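-- pv_equiv track=rewrite | github.com/JC-C4B/Masters-CW | COURSE 4/Module 3/Assignment 1/Assignmet 1 T1.py | check
-- ===== SOURCE A (Python) =====
-- def check(mat):
--     n = len(mat[0])
--     for j in range(n):
--         acc0, acc1 = 0, 0
--         for i in range(len(mat)):
--             if (mat[i][j] == 1):
--                 acc1 += 1
--             elif (mat[i][j] == 0):
--                 acc0 += 1
--             if (acc0 > (n//2)) or (acc1 > n//2):
--                 return False
--     return True
-- ===== SOURCE B (Python) =====
-- def check(mat):
--     n = len(mat[0])
--     zeros = [0] * n
--     ones = [0] * n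
--     for row in mat:
--         zeros = [z + (v == 0) for z, v in zip(zeros, row)]
--         ones = [o + (v == 1) for o, v in zip(ones, row)]
--     half = n // 2
--     return all(z <= half for z in zeros) and all(o <= half for o in ones)
-- ===== Notes on version B (the rewrite author's own statement) =====
-- stated objective: alternative
-- what changed: Replaced A's column-outer scan with scalar accumulators and early return by a single row-major pass maintaining per-column zero/one count lists (pointwise zip updates), followed by a separate majority check over the count lists. Pre_ excludes the empty matrix and ragged matrices with a row shorter than the first row, on which A raises IndexError unless its column-order early exit happens to fire first.
-- outside the precondition, e.g. on check([[0], [1, 1], [1, 0], []]): A returns False, B returns True; on check([[1, 1], [0]]): A raises IndexError, B returns True; on check([]): A raises IndexError, B raises IndexError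
import Mathlib
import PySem

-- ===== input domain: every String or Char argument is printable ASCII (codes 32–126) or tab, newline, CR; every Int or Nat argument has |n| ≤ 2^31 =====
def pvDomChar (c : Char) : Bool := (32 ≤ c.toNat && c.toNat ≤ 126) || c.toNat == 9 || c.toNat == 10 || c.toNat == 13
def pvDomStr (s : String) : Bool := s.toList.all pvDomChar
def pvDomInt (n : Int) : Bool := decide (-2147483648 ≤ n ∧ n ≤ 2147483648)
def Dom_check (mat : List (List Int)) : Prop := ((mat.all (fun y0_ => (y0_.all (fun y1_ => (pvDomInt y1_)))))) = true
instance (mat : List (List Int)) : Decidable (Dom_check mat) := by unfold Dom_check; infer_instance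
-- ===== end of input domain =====

-- B replaces A's column-outer scan (scalar accumulators, early return) by one row-major
-- pass maintaining per-column zero/one count lists, then a separate majority check
-- ('alternative' objective, same asymptotic cost). Equivalence is about the return value.

-- ===== PORT A =====
-- inner loop 'for i in range(len(mat))' over the rows of mat, fetching mat[i][j]
def checkColA (rows : List (List Int)) (j half acc0 acc1 : Int) : Bool :=
  match rows with
  | [] => true
  | r :: rest =>
      let v := (PySem.List.pyGet? r j).getD 2   -- mat[i][j]; none only outside Pre_
      let p : Int × Int :=
        if v = 1 then (acc0, acc1 + 1)
        else if v = 0 then (acc0 + 1, acc1)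
        else (acc0, acc1)
      if p.1 > half || p.2 > half then false else checkColA rest j half p.1 p.2

-- outer loop 'for j in range(n)' with A's 'return False' propagated
def checkColsA (mat : List (List Int)) (js : List Int) (half : Int) : Bool :=
  match js with
  | [] => true
  | j :: rest => if checkColA mat j half 0 0 then checkColsA mat rest half else false

def check (mat : List (List Int)) : Bool :=
  let n : Int := (((PySem.List.pyGet? mat 0).getD []).length : Int)
  checkColsA mat (PySem.List.pyRange 0 n 1) (PySem.Int.floordiv n 2)

-- ===== PORT B =====
def bumpB (p : List Int × List Int) (row : List Int) : List Int × List Int :=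
  (List.zipWith (fun z v => z + (if v = 0 then 1 else 0)) p.1 row,
   List.zipWith (fun o v => o + (if v = 1 then 1 else 0)) p.2 row)

def check_alt (mat : List (List Int)) : Bool :=
  let n : Nat := ((PySem.List.pyGet? mat 0).getD []).length
  let res := mat.foldl bumpB (List.replicate n 0, List.replicate n 0)
  let half : Int := PySem.Int.floordiv (n : Int) 2
  res.1.all (fun z => decide (z ≤ half)) && res.2.all (fun o => decide (o ≤ half))

-- ===== PRECONDITION & SPEC =====
-- Pre_ excludes the empty matrix and ragged matrices with a row shorter than the first
-- row: on those A raises IndexError unless its column-order early exit happens to fire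
-- first (an accident of scan order).
def Pre_check (mat : List (List Int)) : Prop :=
  mat ≠ [] ∧ ∀ r ∈ mat, (mat.headD []).length ≤ r.length
instance (mat : List (List Int)) : Decidable (Pre_check mat) := by unfold Pre_check; infer_instance
def pvWitness_check : List (List Int) := [[0, 1], [1, 0], [1, 1]]

def Spec_check (mat : List (List Int)) (out : Bool) : Prop := out = check_alt mat
instance (mat : List (List Int)) (out : Bool) : Decidable (Spec_check mat out) := by unfold Spec_check; infer_instance

-- ===== CLAIM (what is proved, stated in full; the proofs are below) =====
def Claim_equal_check : Prop := ∀ (mat : List (List Int)), Dom_check mat → Pre_check mat → Spec_check mat (check mat)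

-- ===== LEMMAS AND PROOFS =====

-- number of rows whose j-th entry is 1 (resp. 0)
def cnt (rows : List (List Int)) (j : Nat) (c : Int) : Int :=
  (rows.countP (fun r => r.getD j 2 == c) : Nat)

theorem cnt_nil (j : Nat) (c : Int) : cnt [] j c = 0 := rfl

theorem cnt_cons (r : List Int) (rest : List (List Int)) (j : Nat) (c : Int) :
    cnt (r :: rest) j c = (if r.getD j 2 = c then 1 else 0) + cnt rest j c := by
  unfold cnt
  rw [List.countP_cons]
  push_cast
  simp only [beq_iff_eq]
  ring

theorem cnt_nonneg (rows : List (List Int)) (j : Nat) (c : Int) : 0 ≤ cnt rows j c := by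
  simp [cnt]

-- A's inner loop returns true iff the final counts stay within half
theorem checkColA_eq (rows : List (List Int)) (j : Nat) (half acc0 acc1 : Int)
    (hrow : ∀ r ∈ rows, j < r.length) (h0 : acc0 ≤ half) (h1 : acc1 ≤ half) :
    checkColA rows (j : Int) half acc0 acc1 =
      decide (acc0 + cnt rows j 0 ≤ half ∧ acc1 + cnt rows j 1 ≤ half) := by
  induction rows generalizing acc0 acc1 with
  | nil => simp [checkColA, cnt_nil, h0, h1]
  | cons r rest ih =>
      have hr : j < r.length := hrow r (by simp)
      have hrest : ∀ r' ∈ rest, j < r'.length := fun r' h' => hrow r' (by simp [h'])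
      have hv : (PySem.List.pyGet? r (j : Int)).getD 2 = r.getD j 2 := by
        simp [PySem.List.pyGet?_natCast, List.getD, List.getElem?_eq_getElem hr]
      have h0' := cnt_nonneg rest j 0
      have h1' := cnt_nonneg rest j 1
      rw [checkColA]
      simp only [hv, cnt_cons]
      by_cases hv1 : r.getD j 2 = 1
      · have hne : r.getD j 2 ≠ 0 := by rw [hv1]; norm_num
        simp only [hv1, if_pos rfl, if_neg hne, hv1.symm ▸ (rfl : (1:Int) = 1)]
        by_cases hcap : acc1 + 1 > half
        · rw [if_pos (by simp; omega)]
          symm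
          rw [decide_eq_false_iff_not]
          simp
          omega
        · rw [if_neg (by simp; omega)]
          simp only [show ((0:Int)=1) ↔ False from by norm_num, show ((1:Int)=0) ↔ False from by norm_num, if_false, if_true]
          rw [ih _ _ hrest h0 (by omega)]
          simp only [decide_eq_decide]
          simp; omega
      · by_cases hv0 : r.getD j 2 = 0
        · simp only [if_neg hv1, hv0, if_pos rfl]
          by_cases hcap : acc0 + 1 > half
          · rw [if_pos (by simp; omega)]
            symm
            rw [decide_eq_false_iff_not]
            simp
            omega
          · rw [if_neg (by simp; omega)]
            simp only [show ((0:Int)=1) ↔ False from by norm_num, show ((1:Int)=0) ↔ False from by norm_num, if_false, if_true]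
            rw [ih _ _ hrest (by omega) h1]
            simp only [decide_eq_decide]
            simp; omega
        · simp only [if_neg hv1, if_neg hv0]
          rw [if_neg (by simp; omega)]
          rw [ih _ _ hrest h0 h1]
          simp only [decide_eq_decide]
          simp [hv0, hv1]

-- A's outer loop is an 'all' over the column indices
theorem checkColsA_eq (mat : List (List Int)) (js : List Int) (half : Int) :
    checkColsA mat js half = js.all (fun j => checkColA mat j half 0 0) := by
  induction js with
  | nil => rfl
  | cons j rest ih => rw [checkColsA, List.all_cons, ih]; cases checkColA mat j half 0 0 <;> simp

-- B's fold: lengths are preserved and each entry accumulates the per-column count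
theorem foldB_spec (rows : List (List Int)) (z o : List Int)
    (hlen : z.length = o.length) (hrow : ∀ r ∈ rows, z.length ≤ r.length) :
    (rows.foldl bumpB (z, o)).1.length = z.length ∧
    (rows.foldl bumpB (z, o)).2.length = o.length ∧
    (∀ j < z.length, (rows.foldl bumpB (z, o)).1.getD j 0 = z.getD j 0 + cnt rows j 0) ∧
    (∀ j < o.length, (rows.foldl bumpB (z, o)).2.getD j 0 = o.getD j 0 + cnt rows j 1) := by
  induction rows generalizing z o with
  | nil => simp [cnt_nil]
  | cons r rest ih =>
      have hr : z.length ≤ r.length := hrow r (by simp)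
      have hz' : (List.zipWith (fun z v => z + (if v = 0 then 1 else 0)) z r).length = z.length := by
        simp [List.length_zipWith]; omega
      have ho' : (List.zipWith (fun o v => o + (if v = 1 then 1 else 0)) o r).length = o.length := by
        simp [List.length_zipWith]; omega
      have hstep := ih (List.zipWith (fun z v => z + (if v = 0 then 1 else 0)) z r)
        (List.zipWith (fun o v => o + (if v = 1 then 1 else 0)) o r)
        (by rw [hz', ho', hlen])
        (by intro r' hr'; rw [hz']; exact hrow r' (by simp [hr']))
      rw [List.foldl_cons]
      obtain ⟨l1, l2, e1, e2⟩ := hstep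
      refine ⟨by simpa [bumpB, hz'] using l1, by simpa [bumpB, ho'] using l2, ?_, ?_⟩
      · intro j hj
        have := e1 j (by omega)
        simp only [bumpB] at this ⊢
        rw [this]
        have hjz : j < z.length := hj
        have hjr : j < r.length := by omega
        have : (List.zipWith (fun z v => z + (if v = 0 then 1 else 0)) z r).getD j 0
            = z.getD j 0 + (if r.getD j 2 = 0 then 1 else 0) := by
          rw [List.getD_eq_getElem _ _ (by omega), List.getElem_zipWith,
              List.getD_eq_getElem _ _ hjz, List.getD_eq_getElem _ _ hjr]
        rw [this, cnt_cons]; ring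
      · intro j hj
        have := e2 j (by omega)
        simp only [bumpB] at this ⊢
        rw [this]
        have hjo : j < o.length := hj
        have hjr : j < r.length := by rw [← hlen] at hjo; omega
        have : (List.zipWith (fun o v => o + (if v = 1 then 1 else 0)) o r).getD j 0
            = o.getD j 0 + (if r.getD j 2 = 1 then 1 else 0) := by
          rw [List.getD_eq_getElem _ _ (by omega), List.getElem_zipWith,
              List.getD_eq_getElem _ _ hjo, List.getD_eq_getElem _ _ hjr]
        rw [this, cnt_cons]; ring

theorem all_getD_iff (l : List Int) (half : Int) :
    l.all (fun z => decide (z ≤ half)) = true ↔ ∀ j < l.length, l.getD j 0 ≤ half := by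
  simp only [List.all_eq_true, decide_eq_true_eq]
  constructor
  · intro h j hj
    rw [List.getD_eq_getElem _ _ hj]
    exact h _ (List.getElem_mem hj)
  · intro h x hx
    obtain ⟨j, hj, rfl⟩ := List.getElem_of_mem hx
    have := h j hj
    rwa [List.getD_eq_getElem _ _ hj] at this

-- ===== VERDICT (by name: the statement is the Claim_ definition above) =====
theorem check_spec : Claim_equal_check := by
  intro mat _ hpre
  obtain ⟨hne, hrows⟩ := hpre
  unfold Spec_check check check_alt
  obtain ⟨r0, rest, rfl⟩ : ∃ r0 rest, mat = r0 :: rest := by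
    cases mat with
    | nil => exact absurd rfl hne
    | cons a b => exact ⟨a, b, rfl⟩
  simp only [PySem.List.pyGet?_zero_cons, Option.getD_some]
  set mat := r0 :: rest with hmat
  set n : Nat := r0.length with hn
  have hrows' : ∀ r ∈ mat, n ≤ r.length := by simpa [hmat, hn] using hrows
  set half : Int := PySem.Int.floordiv (n : Int) 2 with hhalf
  have hhalf0 : 0 ≤ half := by
    rw [hhalf, PySem.Int.floordiv_eq_ediv_of_pos (by omega)]; positivity
  -- A side
  rw [checkColsA_eq]
  have hrange := PySem.List.pyRange_zero_natCast n
  rw [hrange, List.all_map]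
  have hA : ∀ j ∈ List.range n,
      (checkColA mat (j : Int) half 0 0) =
        decide (cnt mat j 0 ≤ half ∧ cnt mat j 1 ≤ half) := by
    intro j hj
    rw [List.mem_range] at hj
    rw [checkColA_eq mat j half 0 0 (fun r hr => lt_of_lt_of_le hj (hrows' r hr)) hhalf0 hhalf0]
    simp
  -- B side
  have hfold := foldB_spec mat (List.replicate n 0) (List.replicate n 0)
    (by simp) (by simpa using hrows')
  obtain ⟨l1, l2, e1, e2⟩ := hfold
  simp only [List.length_replicate] at l1 l2 e1 e2
  rw [Bool.eq_iff_iff, List.all_eq_true, Bool.and_eq_true, all_getD_iff, all_getD_iff, l1, l2]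
  constructor
  · intro h
    constructor
    · intro j hj
      rw [e1 j hj]
      have := h j (List.mem_range.mpr hj)
      simp only [Function.comp_apply] at this
      rw [hA j (List.mem_range.mpr hj)] at this
      simp at this
      simp [List.getD_replicate]
      omega
    · intro j hj
      rw [e2 j hj]
      have := h j (List.mem_range.mpr hj)
      simp only [Function.comp_apply] at this
      rw [hA j (List.mem_range.mpr hj)] at this
      simp at this
      simp [List.getD_replicate]
      omega
  · intro ⟨hz, ho⟩ j hjm
    have hj := List.mem_range.mp hjm
    simp only [Function.comp_apply]
    rw [hA j hjm]
    have h1 := hz j hj; have h2 := ho j hj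
    rw [e1 j hj] at h1; rw [e2 j hj] at h2
    simp [List.getD_replicate] at h1 h2
    simp
    omega
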